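-- pv_equiv track=rewrite | github.com/mjorgers/creator | helperscripts/2complement.py | decimal_to_two_complement
-- ===== SOURCE A (Python) =====
-- def decimal_to_two_complement(num_bits, number):
--     # Validate inputs
--     if num_bits < 1:
--         raise ValueError("Number of bits must be positive")
--
--     # Check range
--     max_val = 2**(num_bits - 1) - 1
--     min_val = -(2**(num_bits - 1))
--     if number > max_val or number < min_val:
--         raise ValueError(f"Number out of range for {num_bits} bits: [{min_val}, {max_val}]")
--
--     # Convert to two's complement
--     if number >= 0:
--         binary = format(number, f'0{num_bits}b')
--         hex_val = format(number, f'0{(num_bits + 3) // 4}x')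
--     else:
--         # For negative numbers: get absolute, invert bits, add 1
--         abs_binary = format(abs(number), f'0{num_bits}b')
--         inverted = ''.join('1' if bit == '0' else '0' for bit in abs_binary)
--         two_comp = int(inverted, 2) + 1
--         binary = format(two_comp, f'0{num_bits}b')
--         hex_val = format(two_comp, f'0{(num_bits + 3) // 4}x')
--
--     return binary, hex_val
-- ===== SOURCE B (Python) =====
-- def decimal_to_two_complement(num_bits, number):
--     # Validate inputs
--     if num_bits < 1:
--         raise ValueError("Number of bits must be positive")
--
--     # Check range
--     max_val = 2**(num_bits - 1) - 1
--     min_val = -(2**(num_bits - 1))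
--     if number > max_val or number < min_val:
--         raise ValueError(f"Number out of range for {num_bits} bits: [{min_val}, {max_val}]")
--
--     # Two's complement in closed form: reduce modulo 2**num_bits, format once.
--     value = number % (1 << num_bits)
--     return format(value, f'0{num_bits}b'), format(value, f'0{(num_bits + 3) // 4}x')
-- ===== Notes on version B (the rewrite author's own statement) =====
-- stated objective: simpler
-- what changed: Replaced the positive/negative branch with its character-by-character bit-inversion loop and re-parse by a single modular reduction value = number % (1 << num_bits), formatted once for both outputs.
import Mathlib
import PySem

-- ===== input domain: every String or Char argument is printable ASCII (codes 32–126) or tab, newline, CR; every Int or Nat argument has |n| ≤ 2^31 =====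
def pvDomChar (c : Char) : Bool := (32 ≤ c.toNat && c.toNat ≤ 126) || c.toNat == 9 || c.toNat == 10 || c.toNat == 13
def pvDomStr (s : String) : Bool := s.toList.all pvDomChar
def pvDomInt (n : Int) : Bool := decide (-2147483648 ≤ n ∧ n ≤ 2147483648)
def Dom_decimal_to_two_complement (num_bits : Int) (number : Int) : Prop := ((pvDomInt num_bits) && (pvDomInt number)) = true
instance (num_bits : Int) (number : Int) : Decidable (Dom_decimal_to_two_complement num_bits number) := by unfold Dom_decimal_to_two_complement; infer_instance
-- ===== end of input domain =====

-- B replaces A's positive/negative branch, bit-inversion loop and binary re-parse by one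
-- modular reduction (number % 2^num_bits) formatted once: simpler, same return values.

-- Shared port of Python's builtin format(v, f'0{w}b'/'0{w}x') for v ≥ 0 (zero-padded, lowercase).
def pyFormat (base : Nat) (v : Nat) (w : Nat) : String :=
  let ds := if v = 0 then ['0'] else ((Nat.digits base v).map Nat.digitChar).reverse
  String.ofList (List.replicate (w - ds.length) '0' ++ ds)

-- Port of Python's builtin int(s, 2) for a string of '0'/'1' characters.
def pyIntOfBin (s : String) : Int :=
  Int.ofNat (Nat.ofDigits 2 ((s.toList.map (fun c => c.toNat - 48)).reverse))

-- ===== PORT A =====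
-- max_val / min_val / abs_binary / inverted / two_comp written inline at their use sites.
def decimal_to_two_complement (num_bits : Int) (number : Int) : String × String :=
  if num_bits < 1 then ("", "")  -- raise ValueError: excluded by Pre_
  else if number > 2 ^ (num_bits - 1).toNat - 1 ∨ number < -(2 ^ (num_bits - 1).toNat : Int)
    then ("", "")  -- raise ValueError: excluded by Pre_
  else if number ≥ 0 then
    (pyFormat 2 number.toNat num_bits.toNat,
     pyFormat 16 number.toNat (PySem.Int.floordiv (num_bits + 3) 4).toNat)
  else
    -- abs, invert the bits of the padded binary string, re-parse, add 1
    (pyFormat 2 (pyIntOfBin (String.ofList ((pyFormat 2 number.natAbs num_bits.toNat).toList.map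
        (fun bit => if bit = '0' then '1' else '0'))) + 1).toNat num_bits.toNat,
     pyFormat 16 (pyIntOfBin (String.ofList ((pyFormat 2 number.natAbs num_bits.toNat).toList.map
        (fun bit => if bit = '0' then '1' else '0'))) + 1).toNat (PySem.Int.floordiv (num_bits + 3) 4).toNat)

-- ===== PORT B =====
def decimal_to_two_complement_alt (num_bits : Int) (number : Int) : String × String :=
  if num_bits < 1 then ("", "")  -- raise ValueError
  else if number > 2 ^ (num_bits - 1).toNat - 1 ∨ number < -(2 ^ (num_bits - 1).toNat : Int)
    then ("", "")  -- raise ValueError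
  else
    -- value = number % (1 << num_bits), formatted once for both outputs
    (pyFormat 2 (PySem.Int.mod number (2 ^ num_bits.toNat)).toNat num_bits.toNat,
     pyFormat 16 (PySem.Int.mod number (2 ^ num_bits.toNat)).toNat (PySem.Int.floordiv (num_bits + 3) 4).toNat)

-- ===== PRECONDITION & SPEC =====
-- Pre_ excludes exactly the inputs where A raises ValueError: num_bits < 1 or number out of range.
def Pre_decimal_to_two_complement (num_bits : Int) (number : Int) : Prop :=
  1 ≤ num_bits ∧ -((2 : Int) ^ (num_bits - 1).toNat) ≤ number ∧ number ≤ 2 ^ (num_bits - 1).toNat - 1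
instance (num_bits : Int) (number : Int) : Decidable (Pre_decimal_to_two_complement num_bits number) := by unfold Pre_decimal_to_two_complement; infer_instance
def pvWitness_decimal_to_two_complement : Int × Int := (8, -3)

def Spec_decimal_to_two_complement (num_bits : Int) (number : Int) (out : String × String) : Prop := out = decimal_to_two_complement_alt num_bits number
instance (num_bits : Int) (number : Int) (out : String × String) : Decidable (Spec_decimal_to_two_complement num_bits number out) := by unfold Spec_decimal_to_two_complement; infer_instance

-- ===== CLAIM (what is proved, stated in full; the proofs are below) =====
def Claim_equal_decimal_to_two_complement : Prop := ∀ (num_bits : Int) (number : Int), Dom_decimal_to_two_complement num_bits number → Pre_decimal_to_two_complement num_bits number → Spec_decimal_to_two_complement num_bits number (decimal_to_two_complement num_bits number)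

-- ===== LEMMAS AND PROOFS =====

-- ones-complement over the digit list: inverted value + value + 1 = 2^length
theorem ofDigits_complement (L : List Nat) (h : ∀ d ∈ L, d < 2) :
    Nat.ofDigits 2 (L.map (fun d => 1 - d)) + Nat.ofDigits 2 L + 1 = 2 ^ L.length := by
  induction L with
  | nil => simp
  | cons d t ih =>
    have hd : d < 2 := h d (List.mem_cons_self ..)
    have ih' := ih (fun x hx => h x (List.mem_cons_of_mem _ hx))
    simp only [List.map_cons, Nat.ofDigits_cons, List.length_cons, pow_succ]
    omega

theorem ofDigits_replicate_one (m : Nat) :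
    Nat.ofDigits 2 (List.replicate m 1) + 1 = 2 ^ m := by
  induction m with
  | zero => simp
  | succ m ih =>
    simp only [List.replicate_succ, Nat.ofDigits_cons, pow_succ]
    omega

-- key: invert-and-reparse of the (k+1)-wide binary of a, plus 1, is 2^(k+1) - a
set_option maxHeartbeats 1000000 in
theorem invert_reparse (k a : Nat) (ha : 1 ≤ a) (hle : a ≤ 2 ^ k) :
    pyIntOfBin (String.ofList ((pyFormat 2 a (k + 1)).toList.map
        (fun bit => if bit = '0' then '1' else '0'))) + 1
      = (2 : Int) ^ (k + 1) - a := by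
  obtain ⟨L, hL⟩ : ∃ L, Nat.digits 2 a = L := ⟨_, rfl⟩
  have hlen : L.length ≤ k + 1 := by
    rw [← hL, Nat.digits_length_le_iff (by norm_num)]
    have h2 : 0 < 2 ^ k := Nat.two_pow_pos k
    calc a ≤ 2 ^ k := hle
      _ < 2 ^ (k + 1) := by rw [pow_succ]; omega
  have hlt : ∀ d ∈ L, d < 2 := fun d hd => Nat.digits_lt_base (by norm_num) (hL ▸ hd)
  have hform : (pyFormat 2 a (k + 1)).toList
      = List.replicate (k + 1 - L.length) '0' ++ (L.map Nat.digitChar).reverse := by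
    simp [pyFormat, show a ≠ 0 by omega, hL, String.toList_ofList]
  have hdig : ((String.ofList ((pyFormat 2 a (k + 1)).toList.map
        (fun bit => if bit = '0' then '1' else '0'))).toList.map (fun c => c.toNat - 48)).reverse
      = (L.map fun d => 1 - d) ++ List.replicate (k + 1 - L.length) 1 := by
    rw [String.toList_ofList, hform]
    simp only [List.map_append, List.map_replicate, List.map_reverse, List.map_map,
      List.reverse_append, List.reverse_reverse, List.reverse_replicate]
    congr 1
    refine List.map_congr_left (fun d hd => ?_)
    have := hlt d hd
    interval_cases d <;> rfl
  have hofd : Nat.ofDigits 2 L = a := by rw [← hL]; exact Nat.ofDigits_digits 2 a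
  have hcomp := ofDigits_complement L hlt
  have hrep := ofDigits_replicate_one (k + 1 - L.length)
  rw [hofd] at hcomp
  have hval : Nat.ofDigits 2 ((L.map fun d => 1 - d) ++ List.replicate (k + 1 - L.length) 1)
        + 1 + a = 2 ^ (k + 1) := by
    rw [Nat.ofDigits_append, List.length_map]
    calc Nat.ofDigits 2 (L.map fun d => 1 - d)
          + 2 ^ L.length * Nat.ofDigits 2 (List.replicate (k + 1 - L.length) 1) + 1 + a
        = 2 ^ L.length * Nat.ofDigits 2 (List.replicate (k + 1 - L.length) 1)
          + (Nat.ofDigits 2 (L.map fun d => 1 - d) + a + 1) := by ring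
      _ = 2 ^ L.length * Nat.ofDigits 2 (List.replicate (k + 1 - L.length) 1)
          + 2 ^ L.length := by rw [hcomp]
      _ = 2 ^ L.length * (Nat.ofDigits 2 (List.replicate (k + 1 - L.length) 1) + 1) := by ring
      _ = 2 ^ L.length * 2 ^ (k + 1 - L.length) := by rw [hrep]
      _ = 2 ^ (L.length + (k + 1 - L.length)) := (pow_add 2 L.length (k + 1 - L.length)).symm
      _ = 2 ^ (k + 1) := by rw [Nat.add_sub_cancel' hlen]
  unfold pyIntOfBin
  rw [hdig]
  rw [show ((2 : Int)) ^ (k + 1) = ((2 ^ (k + 1) : Nat) : Int) from by push_cast; ring,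
    Int.ofNat_eq_natCast]
  omega

theorem decimal_to_two_complement_eq (num_bits number : Int)
    (hpre : Pre_decimal_to_two_complement num_bits number) :
    decimal_to_two_complement num_bits number = decimal_to_two_complement_alt num_bits number := by
  obtain ⟨h1, hlo, hhi⟩ := hpre
  obtain ⟨k, hk⟩ : ∃ k, (num_bits - 1).toNat = k := ⟨_, rfl⟩
  have hnb : num_bits.toNat = k + 1 := by omega
  rw [hk] at hlo hhi
  have hpos : (0 : Int) < 2 ^ k := by positivity
  have hpos' : (0 : Int) < 2 ^ (k + 1) := by positivity
  have hklt : (2 : Int) ^ k < 2 ^ (k + 1) := by rw [pow_succ]; omega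
  unfold decimal_to_two_complement decimal_to_two_complement_alt
  rw [hk, hnb]
  rw [if_neg (show ¬ num_bits < 1 by omega), if_neg (show ¬ num_bits < 1 by omega),
    if_neg (show ¬ (number > 2 ^ k - 1 ∨ number < -((2 : Int) ^ k)) by rw [not_or]; omega),
    if_neg (show ¬ (number > 2 ^ k - 1 ∨ number < -((2 : Int) ^ k)) by rw [not_or]; omega)]
  by_cases hnn : number ≥ 0
  · rw [if_pos hnn]
    have hmod : PySem.Int.mod number (2 ^ (k + 1)) = number := by
      rw [PySem.Int.mod_eq_emod_of_pos hpos']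
      exact Int.emod_eq_of_lt hnn (by omega)
    rw [hmod]
  · rw [if_neg hnn]
    have ha1 : 1 ≤ number.natAbs := by omega
    have hcast : ((2 ^ k : Nat) : Int) = 2 ^ k := by push_cast; ring
    have hale : number.natAbs ≤ 2 ^ k := by omega
    have hmod : PySem.Int.mod number (2 ^ (k + 1)) = (2 : Int) ^ (k + 1) - number.natAbs := by
      rw [PySem.Int.mod_eq_emod_of_pos hpos']
      rw [← Int.add_mul_emod_self_left (a := number) (b := 2 ^ (k + 1)) (c := 1), mul_one]
      rw [Int.emod_eq_of_lt (by omega) (by omega)]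
      omega
    have hkey := invert_reparse k number.natAbs ha1 hale
    rw [hmod, ← hkey]

-- ===== VERDICT (by name: the statement is the Claim_ definition above) =====
theorem decimal_to_two_complement_spec : Claim_equal_decimal_to_two_complement := by
  intro num_bits number _ hpre
  unfold Spec_decimal_to_two_complement
  exact decimal_to_two_complement_eq num_bits number hpre
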